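-- pv_equiv track=rewrite | github.com/libertas/Brainhelp | brainhelp.py | phrase
-- ===== SOURCE A (Python) =====
-- def phrase(code=""):
-- 	IGNORE="""}	"""
-- 	result=[]
-- 	tmp=""
--
-- 	for i in code:
--
-- 		if i in IGNORE:
-- 			pass
--
-- 		elif i ==";" or i =="{":
-- 			result.append(tmp)
-- 			tmp=""
--
-- 		else:
-- 			tmp+=i
--
-- 	tmp=result
-- 	result=[]
--
-- 	for i in tmp:
-- 		if not i.startswith("#"):
-- 			result.append(i)
--
-- 	return result
-- ===== SOURCE B (Python) =====
-- def phrase(code=""):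
--     cleaned = code.replace('}', '').replace('\t', '')
--     tokens = cleaned.replace('{', ';').split(';')[:-1]
--     return [t for t in tokens if not t.startswith('#')]
-- ===== Notes on version B (the rewrite author's own statement) =====
-- stated objective: idiomatic
-- what changed: A's two explicit loops (char-by-char accumulator split, then a token filter loop) are replaced by a pipeline: strip '}'/tab with str.replace, map '{' to ';', split on ';', drop the last (unterminated) piece, and filter out '#'-prefixed tokens with a comprehension.
import Mathlib
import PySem

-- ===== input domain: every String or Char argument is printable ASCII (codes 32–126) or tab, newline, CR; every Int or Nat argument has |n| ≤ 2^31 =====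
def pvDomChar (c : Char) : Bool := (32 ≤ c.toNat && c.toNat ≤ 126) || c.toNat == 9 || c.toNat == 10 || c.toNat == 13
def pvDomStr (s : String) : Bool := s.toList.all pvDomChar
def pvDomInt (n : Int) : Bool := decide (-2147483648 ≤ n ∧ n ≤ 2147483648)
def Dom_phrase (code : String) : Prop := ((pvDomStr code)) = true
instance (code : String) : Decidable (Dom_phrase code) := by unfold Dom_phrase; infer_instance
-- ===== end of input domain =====

-- B replaces A's explicit character/token loops with an idiomatic normalize('}'/tab removed) → split on ';' (after mapping '{'→';') → drop last → filter(#) pipeline.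


-- ===== PORT A =====
-- the first loop of A: state (result, tmp); tmp kept as List Char (Python string concatenation)
def phraseLoopA : List Char → List String → List Char → List String
  | [], result, _tmp => result
  | i :: rest, result, tmp =>
    if i = '}' ∨ i = '\t' then phraseLoopA rest result tmp
    else if i = ';' ∨ i = '{' then phraseLoopA rest (result ++ [String.ofList tmp]) []
    else phraseLoopA rest result (tmp ++ [i])

def phrase (code : String) : List String :=
  let toks := phraseLoopA code.toList [] []
  -- second loop of A: filter out tokens starting with '#', appending to a fresh result
  toks.foldl (fun result i => if (!(PySem.Str.startswith i "#")) = true then result ++ [i] else result) []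

-- ===== PORT B =====
def phrase_alt (code : String) : List String :=
  let cleaned := PySem.Str.replace (PySem.Str.replace code "}" "") "\t" ""
  -- ';' is a nonempty separator, so split? is always `some`; getD only totalizes
  let tokens := PySem.List.slice ((PySem.Str.split? (PySem.Str.replace cleaned "{" ";") ";").getD []) none (some (-1))
  tokens.filter (fun t => !(PySem.Str.startswith t "#"))

-- ===== PRECONDITION & SPEC =====
def Spec_phrase (code : String) (out : List String) : Prop := out = phrase_alt code
instance (code : String) (out : List String) : Decidable (Spec_phrase code out) := by unfold Spec_phrase; infer_instance

-- ===== CLAIM (what is proved, stated in full; the proofs are below) =====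
def Claim_equal_phrase : Prop := ∀ (code : String), Dom_phrase code → Spec_phrase code (phrase code)

-- ===== LEMMAS AND PROOFS =====

-- characters A's first loop ignores
def pvClean (c : Char) : Bool := !(c = '}' ∨ c = '\t')

-- '{' ↦ ';' substitution done by B's cleaned.replace('{',';')
def pvSub (c : Char) : Char := if c = '{' then ';' else c

-- segments of a (cleaned) character list between delimiters ';'/'{', INCLUDING the trailing one
def pvSegs : List Char → List (List Char)
  | [] => [[]]
  | c :: t => if c = ';' ∨ c = '{' then [] :: pvSegs t else (pvSegs t).modifyHead (c :: ·)

-- split at a single character, recursion-on-list form of Chars.splitOn s [c]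
def pvSplit1 (c : Char) : List Char → List (List Char)
  | [] => [[]]
  | a :: t => if a = c then [] :: pvSplit1 c t else (pvSplit1 c t).modifyHead (a :: ·)

theorem pvSegs_ne_nil (cs : List Char) : pvSegs cs ≠ [] := by
  cases cs with
  | nil => simp [pvSegs]
  | cons c t =>
    simp only [pvSegs]
    split
    · simp
    · intro h
      exact pvSegs_ne_nil t (by cases h' : pvSegs t <;> simp_all [List.modifyHead])

theorem modifyHead_nil_append {α : Type} (l : List (List α)) :
    l.modifyHead (fun x => ([] : List α) ++ x) = l := by
  cases l <;> simp

theorem modifyHead_id {α : Type} (l : List α) : l.modifyHead (fun x => x) = l := by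
  cases l <;> simp

theorem modifyHead_modifyHead' {α : Type} (l : List α) (f g : α → α) :
    (l.modifyHead f).modifyHead g = l.modifyHead (fun x => g (f x)) := by
  cases l <;> simp

-- replace.go with old a single char, new = "": deletion = filter
theorem replace_go_del (c : Char) :
    ∀ (fuel : Nat) (l acc : List Char), l.length ≤ fuel →
      PySem.Chars.replace.go [c] [] fuel l acc = acc.reverse ++ l.filter (fun a => !(a = c)) := by
  intro fuel
  induction fuel with
  | zero => intro l acc h; cases l <;> simp_all [PySem.Chars.replace.go]
  | succ n ih =>
    intro l acc h
    cases l with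
    | nil => simp [PySem.Chars.replace.go]
    | cons a t =>
      have hlen : t.length ≤ n := by simp at h; omega
      by_cases hac : a = c
      · subst hac
        have iht := ih t acc hlen
        simp [PySem.Chars.replace.go, List.isPrefixOf, iht]
      · have iht := ih t (a :: acc) hlen
        have hba : (c == a) = false := by simp [Ne.symm hac]
        simp [PySem.Chars.replace.go, List.isPrefixOf, hba, iht, hac]

theorem replace_del (cs : List Char) (c : Char) :
    PySem.Chars.replace cs [c] [] = cs.filter (fun a => !(a = c)) := by
  simp only [PySem.Chars.replace]
  rw [if_neg (by simp)]
  simpa using replace_go_del c cs.length cs [] le_rfl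

-- replace.go with single-char old and new: substitution = map
theorem replace_go_sub :
    ∀ (fuel : Nat) (l acc : List Char), l.length ≤ fuel →
      PySem.Chars.replace.go ['{'] [';'] fuel l acc = acc.reverse ++ l.map pvSub := by
  intro fuel
  induction fuel with
  | zero => intro l acc h; cases l <;> simp_all [PySem.Chars.replace.go]
  | succ n ih =>
    intro l acc h
    cases l with
    | nil => simp [PySem.Chars.replace.go]
    | cons a t =>
      have hlen : t.length ≤ n := by simp at h; omega
      by_cases hac : a = '{'
      · subst hac
        have iht := ih t (';' :: acc) hlen
        simp [PySem.Chars.replace.go, List.isPrefixOf, iht, pvSub]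
      · have iht := ih t (a :: acc) hlen
        have hba : ('{' == a) = false := by simp [Ne.symm hac]
        simp [PySem.Chars.replace.go, List.isPrefixOf, hba, iht, pvSub, hac]

theorem replace_sub (cs : List Char) :
    PySem.Chars.replace cs ['{'] [';'] = cs.map pvSub := by
  simp only [PySem.Chars.replace]
  rw [if_neg (by simp)]
  simpa using replace_go_sub cs.length cs [] le_rfl

-- splitOn.go with a single-char separator
theorem splitOn_go_single (c : Char) :
    ∀ (fuel : Nat) (l cur : List Char) (parts : List (List Char)), l.length ≤ fuel →
      PySem.Chars.splitOn.go [c] fuel l cur parts =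
        parts.reverse ++ (pvSplit1 c l).modifyHead (fun x => cur.reverse ++ x) := by
  intro fuel
  induction fuel with
  | zero =>
    intro l cur parts h
    cases l <;> simp_all [PySem.Chars.splitOn.go, pvSplit1]
  | succ n ih =>
    intro l cur parts h
    cases l with
    | nil => simp [PySem.Chars.splitOn.go, pvSplit1]
    | cons a t =>
      have hlen : t.length ≤ n := by simp at h; omega
      by_cases hac : a = c
      · subst hac
        have iht := ih t [] (cur.reverse :: parts) hlen
        simp [PySem.Chars.splitOn.go, List.isPrefixOf, iht, pvSplit1, modifyHead_id]
      · have iht := ih t (a :: cur) parts hlen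
        have hba : (c == a) = false := by simp [Ne.symm hac]
        simp [PySem.Chars.splitOn.go, List.isPrefixOf, hba, iht, pvSplit1, hac]
        rfl

theorem splitOn_single (cs : List Char) (c : Char) :
    PySem.Chars.splitOn cs [c] = pvSplit1 c cs := by
  simp only [PySem.Chars.splitOn]
  rw [splitOn_go_single c (cs.length + 1) cs [] [] (by omega)]
  simp [modifyHead_id]

theorem split1_map_sub (cs : List Char) : pvSplit1 ';' (cs.map pvSub) = pvSegs cs := by
  induction cs with
  | nil => simp [pvSplit1, pvSegs]
  | cons a t ih =>
    simp only [List.map_cons, pvSplit1, pvSegs]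
    by_cases h : a = ';' ∨ a = '{'
    · have : pvSub a = ';' := by rcases h with h | h <;> simp [pvSub, h]
      simp [this, h, ih]
    · have h1 : a ≠ ';' ∧ a ≠ '{' := by tauto
      have h2 : pvSub a = a := by simp [pvSub, h1.2]
      simp [h2, h1.1, h1.2, ih]

-- map String.ofList commutes with dropLast
theorem map_ofList_dropLast (l : List (List Char)) :
    (l.map String.ofList).dropLast = l.dropLast.map String.ofList := by
  induction l with
  | nil => simp
  | cons a t ih => cases t <;> simp_all

-- the invariant of A's first loop
theorem phraseLoopA_eq (cs : List Char) :
    ∀ (res : List String) (tmp : List Char),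
      phraseLoopA cs res tmp =
        res ++ ((((pvSegs (cs.filter pvClean)).modifyHead (fun x => tmp ++ x)).dropLast).map String.ofList) := by
  induction cs with
  | nil => intro res tmp; simp [phraseLoopA, pvSegs]
  | cons i rest ih =>
    intro res tmp
    by_cases hig : i = '}' ∨ i = '\t'
    · have hc : pvClean i = false := by simp [pvClean, hig]
      simp only [phraseLoopA, if_pos hig, List.filter_cons, hc]
      simpa using ih res tmp
    · have hc : pvClean i = true := by simp [pvClean, hig]
      by_cases hd : i = ';' ∨ i = '{'
      · have iht := ih (res ++ [String.ofList tmp]) []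
        have hne := pvSegs_ne_nil (rest.filter pvClean)
        simp only [phraseLoopA, if_neg hig, if_pos hd, List.filter_cons, hc, if_true]
        rw [iht]
        have hseg : pvSegs (i :: List.filter pvClean rest) = [] :: pvSegs (List.filter pvClean rest) := by
          simp [pvSegs, hd]
        rw [hseg]
        simp only [List.modifyHead_cons, List.append_nil, modifyHead_nil_append,
          List.dropLast_cons_of_ne_nil hne, List.map_cons]
        simp
      · have iht := ih res (tmp ++ [i])
        simp only [phraseLoopA, if_neg hig, if_neg hd, List.filter_cons, hc, if_true]
        rw [iht]
        simp only [pvSegs, if_neg hd, modifyHead_modifyHead']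
        have hfun : (fun x : List Char => tmp ++ [i] ++ x) = (fun x : List Char => tmp ++ i :: x) := by
          funext x; simp
        rw [hfun]

-- ===== VERDICT (by name: the statement is the Claim_ definition above) =====
theorem phrase_spec : Claim_equal_phrase := by
  intro code _
  unfold Spec_phrase
  simp only [phrase, phrase_alt]
  have hclean : (PySem.Str.replace (PySem.Str.replace code "}" "") "\t" "").toList
      = code.toList.filter pvClean := by
    simp only [PySem.Str.toList_replace]
    rw [show ("}" : String).toList = ['}'] from rfl, show ("\t" : String).toList = ['\t'] from rfl,
      show ("" : String).toList = [] from rfl]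
    rw [replace_del, replace_del, List.filter_filter]
    congr 1
    funext a
    simp [pvClean, Bool.and_comm]
  have hmap : (PySem.Str.replace (PySem.Str.replace (PySem.Str.replace code "}" "") "\t" "") "{" ";").toList
      = (code.toList.filter pvClean).map pvSub := by
    simp only [PySem.Str.toList_replace, hclean]
    rw [show ("{" : String).toList = ['{'] from rfl, show (";" : String).toList = [';'] from rfl]
    exact replace_sub _
  have hsplit : PySem.Str.split? (PySem.Str.replace (PySem.Str.replace (PySem.Str.replace code "}" "") "\t" "") "{" ";") ";"
      = some ((pvSegs (code.toList.filter pvClean)).map String.ofList) := by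
    have hb := PySem.Str.split?_map (PySem.Str.replace (PySem.Str.replace (PySem.Str.replace code "}" "") "\t" "") "{" ";") ";"
    rw [hmap, show (";" : String).toList = [';'] from rfl, PySem.Chars.split?] at hb
    rw [if_neg (by simp)] at hb
    rw [splitOn_single, split1_map_sub] at hb
    cases hsp : PySem.Str.split? (PySem.Str.replace (PySem.Str.replace (PySem.Str.replace code "}" "") "\t" "") "{" ";") ";" with
    | none => rw [hsp] at hb; simp at hb
    | some L =>
      rw [hsp] at hb
      simp only [Option.map_some] at hb
      have hL : L.map String.toList = pvSegs (code.toList.filter pvClean) := by injection hb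
      have hLe : L = (L.map String.toList).map String.ofList := by
        simp [List.map_map, Function.comp_def]
      rw [hLe, hL]
  rw [hsplit]
  simp only [Option.getD_some]
  rw [PySem.List.slice_to_neg_one]
  rw [phraseLoopA_eq code.toList [] []]
  rw [PySem.List.foldl_append_if (fun i => !(PySem.Str.startswith i "#")) (fun x : String => x)]
  simp only [List.nil_append, modifyHead_id, map_ofList_dropLast, List.map_id']
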